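-- pv_equiv track=rewrite | github.com/EagleZhen/prepare-leetcode-problem-and-template | prepare leetcode problem and template.py | format_heading
-- ===== SOURCE A (Python) =====
-- def is_heading(line: str) -> bool:
--     return (
--         line.startswith("**")
--         and line.endswith("**")
--         and ((line.find("Example") != -1) or (line.find("Constraints") != -1))
--     )
--
-- def format_heading(markdown_content: str) -> str:
--     lines = markdown_content.split("\n")
--     modified_lines = []
--     for line in lines:
--         if is_heading(line):
--             line = "## " + line[2:-2]  # remove bold formatting and make it a 2nd level heading
--             modified_lines.append(line)
--         else:
--             modified_lines.append(line)
--     modified_markdown_content = "\n".join(modified_lines)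
--     return modified_markdown_content
-- ===== SOURCE B (Python) =====
-- def format_heading(markdown_content: str) -> str:
--     # single pass over characters: no intermediate list of lines, no split/join
--     def fix(line):
--         if line[:2] == "**" and line[-2:] == "**" and ("Example" in line or "Constraints" in line):
--             return "## " + line[2:-2]
--         return line
--     out = ""
--     cur = ""
--     for ch in markdown_content:
--         if ch == "\n":
--             out += fix(cur) + "\n"
--             cur = ""
--         else:
--             cur += ch
--     return out + fix(cur)
-- ===== Notes on version B (the rewrite author's own statement) =====
-- stated objective: alternative
-- what changed: Replaces A's split-into-lines / per-line loop over a list of lines / join with a single character-by-character pass that keeps a pending-line buffer and emits each (possibly rewritten) line as its terminating newline is seen; no intermediate list of lines is built.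
import Mathlib
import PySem

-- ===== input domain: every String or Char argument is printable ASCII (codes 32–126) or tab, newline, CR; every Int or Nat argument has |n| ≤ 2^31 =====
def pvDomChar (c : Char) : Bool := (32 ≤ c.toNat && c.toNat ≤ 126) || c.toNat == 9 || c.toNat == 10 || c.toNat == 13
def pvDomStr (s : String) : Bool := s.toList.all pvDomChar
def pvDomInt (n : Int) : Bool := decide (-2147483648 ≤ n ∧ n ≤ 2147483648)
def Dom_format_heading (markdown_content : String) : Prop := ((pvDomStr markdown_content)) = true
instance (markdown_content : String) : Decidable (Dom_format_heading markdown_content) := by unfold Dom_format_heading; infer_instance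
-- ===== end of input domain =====

-- B replaces A's split/loop/join over a list of lines by one character pass with a pending-line buffer; objective: alternative (same cost, no intermediate line list).

-- ===== PORT A =====
def is_heading (line : String) : Bool :=
  PySem.Str.startswith line "**" && PySem.Str.endswith line "**" &&
    (PySem.Str.find line "Example" != -1 || PySem.Str.find line "Constraints" != -1)

def format_heading (markdown_content : String) : String :=
  let lines := (PySem.Str.split? markdown_content "\n").getD []
  let modified_lines := lines.foldl (fun acc line =>
      if is_heading line then acc ++ ["## " ++ PySem.Str.slice line (some 2) (some (-2))]
      else acc ++ [line]) []
  PySem.Str.join "\n" modified_lines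

-- ===== PORT B =====
-- Source B's fix(line): heading test by slices/membership, then the rewrite
def fixLineB (line : List Char) : List Char :=
  if (PySem.Chars.slice line none (some 2) == "**".toList) &&
     (PySem.Chars.slice line (some (-2)) none == "**".toList) &&
     (PySem.Chars.isIn "Example".toList line || PySem.Chars.isIn "Constraints".toList line) then
    "## ".toList ++ PySem.Chars.slice line (some 2) (some (-2))
  else line

-- Source B's for-loop: out/cur accumulators, one pass over the characters
def bGo (out cur : List Char) : List Char → List Char
  | [] => out ++ fixLineB cur
  | c :: rest =>
    if c = '\n' then bGo (out ++ fixLineB cur ++ ['\n']) [] rest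
    else bGo out (cur ++ [c]) rest

def format_heading_alt (markdown_content : String) : String :=
  String.ofList (bGo [] [] markdown_content.toList)

-- ===== PRECONDITION & SPEC =====
def Spec_format_heading (markdown_content : String) (out : String) : Prop := out = format_heading_alt markdown_content
instance (markdown_content : String) (out : String) : Decidable (Spec_format_heading markdown_content out) := by unfold Spec_format_heading; infer_instance

-- ===== CLAIM (what is proved, stated in full; the proofs are below) =====
def Claim_equal_format_heading : Prop := ∀ (markdown_content : String), Dom_format_heading markdown_content → Spec_format_heading markdown_content (format_heading markdown_content)

-- ===== LEMMAS AND PROOFS =====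

-- reference line-splitter (reversed pending buffer, like splitOn.go's)
def mhelp : List Char → List Char → List (List Char)
  | cur, [] => [cur.reverse]
  | cur, c :: rest => if c = '\n' then cur.reverse :: mhelp [] rest else mhelp (c :: cur) rest

lemma mhelp_ne_nil (cs : List Char) : ∀ cur, mhelp cur cs ≠ [] := by
  induction cs with
  | nil => intro cur; simp [mhelp]
  | cons c rest ih =>
    intro cur
    by_cases hc : c = '\n' <;> simp [mhelp, hc, ih]

lemma go_spec (fuel : Nat) : ∀ (l cur : List Char) (acc : List (List Char)),
    l.length < fuel →
    PySem.Chars.splitOn.go ['\n'] fuel l cur acc = acc.reverse ++ mhelp cur l := by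
  induction fuel with
  | zero => intro l cur acc h; omega
  | succ f ih =>
    intro l cur acc h
    cases l with
    | nil => simp [PySem.Chars.splitOn.go, mhelp]
    | cons c rest =>
      by_cases hc : c = '\n'
      · have h1 : PySem.Chars.splitOn.go ['\n'] (f+1) (c :: rest) cur acc =
            PySem.Chars.splitOn.go ['\n'] f rest [] (cur.reverse :: acc) := by
          simp [PySem.Chars.splitOn.go, List.isPrefixOf, hc]
        rw [h1, ih rest [] (cur.reverse :: acc) (by simp at h; omega)]
        simp [mhelp, hc]
      · have h1 : PySem.Chars.splitOn.go ['\n'] (f+1) (c :: rest) cur acc =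
            PySem.Chars.splitOn.go ['\n'] f rest (c :: cur) acc := by
          simp [PySem.Chars.splitOn.go, List.isPrefixOf, Ne.symm hc]
        rw [h1, ih rest (c :: cur) acc (by simp at h; omega)]
        simp [mhelp, hc]

lemma splitOn_newline (cs : List Char) : PySem.Chars.splitOn cs ['\n'] = mhelp [] cs := by
  have := go_spec (cs.length + 1) cs [] [] (by omega)
  simpa [PySem.Chars.splitOn] using this

lemma pref2 (l : List Char) :
    PySem.Chars.slice l none (some 2) = "**".toList ↔ "**".toList <+: l := by
  have h2 : "**".toList = ['*','*'] := by decide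
  rw [h2, PySem.Chars.slice_eq_listSlice, PySem.List.slice_to l (b := 2) (by norm_num)]
  rw [List.prefix_iff_eq_take]
  constructor <;> intro h <;> simpa [eq_comm] using h

lemma suff2 (l : List Char) :
    PySem.Chars.slice l (some (-2)) none = "**".toList ↔ "**".toList <:+ l := by
  have h2 : "**".toList = ['*','*'] := by decide
  rw [h2, PySem.Chars.slice_eq_listSlice, PySem.List.slice_from_neg_ofNat l 2 (by norm_num)]
  rw [List.suffix_iff_eq_drop]
  constructor <;> intro h <;> simpa [eq_comm] using h

lemma heading_eq (line : String) :
    is_heading line =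
      ((PySem.Chars.slice line.toList none (some 2) == "**".toList) &&
       (PySem.Chars.slice line.toList (some (-2)) none == "**".toList) &&
       (PySem.Chars.isIn "Example".toList line.toList ||
        PySem.Chars.isIn "Constraints".toList line.toList)) := by
  apply Bool.eq_iff_iff.mpr
  simp only [is_heading, PySem.Str.startswith_eq, PySem.Str.endswith_eq, PySem.Str.find_eq,
    PySem.Chars.startswith, PySem.Chars.endswith, PySem.Chars.isIn,
    Bool.and_eq_true, Bool.or_eq_true, beq_iff_eq, bne_iff_ne]
  rw [List.isPrefixOf_iff_prefix, List.isSuffixOf_iff_suffix, pref2, suff2]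

lemma fixS_eq (line : String) :
    (if is_heading line then "## " ++ PySem.Str.slice line (some 2) (some (-2)) else line).toList
      = fixLineB line.toList := by
  rw [fixLineB, heading_eq]
  split_ifs with h
  · simp [PySem.Str.toList_slice]
  · rfl

lemma foldl_if_map (ls : List String) : ∀ (acc : List String),
    ls.foldl (fun acc line =>
      if is_heading line then acc ++ ["## " ++ PySem.Str.slice line (some 2) (some (-2))]
      else acc ++ [line]) acc
    = acc ++ ls.map (fun line =>
        if is_heading line then "## " ++ PySem.Str.slice line (some 2) (some (-2)) else line) := by
  induction ls with
  | nil => intro acc; simp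
  | cons l rest ih =>
    intro acc
    by_cases h : is_heading l <;> simp [List.foldl_cons, h, ih]

lemma A_eq (s : String) :
    (format_heading s).toList = PySem.Chars.join ['\n'] ((mhelp [] s.toList).map fixLineB) := by
  have hnl : "\n".toList = ['\n'] := by decide
  have hsplit : PySem.Str.split? s "\n" = some ((mhelp [] s.toList).map String.ofList) := by
    simp [PySem.Str.split?, PySem.Chars.split?, hnl, splitOn_newline]
  unfold format_heading
  rw [hsplit]
  simp only [Option.getD_some, foldl_if_map, List.nil_append, PySem.Str.toList_join, hnl,
    List.map_map]
  congr 1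
  apply List.map_congr_left
  intro l _
  simpa [String.toList_ofList] using fixS_eq (String.ofList l)

lemma B_eq (cs : List Char) : ∀ (out cur : List Char),
    bGo out cur cs = out ++ PySem.Chars.join ['\n'] ((mhelp cur.reverse cs).map fixLineB) := by
  induction cs with
  | nil => intro out cur; simp [bGo, mhelp, PySem.Chars.join_singleton]
  | cons c rest ih =>
    intro out cur
    by_cases hc : c = '\n'
    · rcases hq : mhelp [] rest with _ | ⟨q, qs⟩
      · exact absurd hq (mhelp_ne_nil rest [])
      · subst hc
        have hL : bGo out cur ('\n' :: rest) = bGo (out ++ fixLineB cur ++ ['\n']) [] rest := by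
          simp [bGo]
        have hR : mhelp cur.reverse ('\n' :: rest) = cur :: (q :: qs) := by
          simp [mhelp, hq]
        rw [hL, ih, hR]
        simp [hq, PySem.Chars.join_cons_cons]
    · simp only [bGo, hc, ih, mhelp, List.reverse_append, List.reverse_cons,
        List.reverse_nil, List.nil_append]
      simp

-- ===== VERDICT (by name: the statement is the Claim_ definition above) =====
theorem format_heading_spec : Claim_equal_format_heading := by
  intro s _
  unfold Spec_format_heading format_heading_alt
  apply String.toList_inj.mp
  rw [A_eq, String.toList_ofList, B_eq]
  simp
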